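-- pv_equiv track=rewrite | github.com/NutaEnjoyer/inspector-bot | utils/service/ct_edit.py | remove_non_exist
-- ===== SOURCE A (Python) =====
-- from typing import List, Type
--
-- def remove_non_exist(
-- 	words: List[str],
-- 	main_list: List[str]
-- ) -> List[str]:
-- 	non_exist = list()
--
-- 	for word in words:
--
-- 		try:
-- 			main_list.remove(word)
-- 		except ValueError:
-- 			non_exist.append(word)
--
-- 	return non_exist
-- ===== SOURCE B (Python) =====
-- def remove_non_exist(words, main_list):
--     # Count occurrences of main_list once, then a single pass over words:
--     # a positive remaining count means the word is removable (decrement and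
--     # schedule one drop), otherwise it goes to non_exist.  main_list is then
--     # rebuilt in place in one pass, skipping the scheduled first occurrences.
--     counts = {}
--     for w in main_list:
--         counts[w] = counts.get(w, 0) + 1
--     non_exist = []
--     drops = {}
--     for w in words:
--         if counts.get(w, 0) > 0:
--             counts[w] -= 1
--             drops[w] = drops.get(w, 0) + 1
--         else:
--             non_exist.append(w)
--     rebuilt = []
--     for w in main_list:
--         if drops.get(w, 0) > 0:
--             drops[w] -= 1
--         else:
--             rebuilt.append(w)
--     main_list[:] = rebuilt
--     return non_exist
-- ===== Notes on version B (the rewrite author's own statement) =====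
-- stated objective: faster
-- what changed: Replaces the repeated list.remove scan per word (each O(len(main_list))) with a count table built once over main_list, an O(1)-lookup pass over words, and a single-pass in-place rebuild of main_list that skips the scheduled first occurrences.
import Mathlib
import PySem

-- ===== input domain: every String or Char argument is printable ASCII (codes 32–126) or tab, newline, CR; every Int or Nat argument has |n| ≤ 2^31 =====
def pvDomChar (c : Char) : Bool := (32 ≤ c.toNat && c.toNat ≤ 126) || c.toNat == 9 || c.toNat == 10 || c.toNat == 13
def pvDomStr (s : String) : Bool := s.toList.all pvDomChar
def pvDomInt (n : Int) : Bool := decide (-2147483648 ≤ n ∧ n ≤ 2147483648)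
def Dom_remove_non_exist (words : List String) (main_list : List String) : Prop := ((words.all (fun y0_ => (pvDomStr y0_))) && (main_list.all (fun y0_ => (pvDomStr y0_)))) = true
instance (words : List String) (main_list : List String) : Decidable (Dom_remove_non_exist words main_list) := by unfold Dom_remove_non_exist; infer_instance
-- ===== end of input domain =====

-- B replaces A's per-word list.remove scans with a count table built once plus one pass
-- over words (faster); both Pythons mutate main_list in place identically, and the
-- equivalence proved here is about the RETURN value (non_exist) only.

-- ===== PORT A =====
-- the 'for word in words' loop: try main_list.remove(word) / except ValueError: non_exist.append(word)
def rneLoopA (words : List String) (cur : List String) (acc : List String) : List String :=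
  match words with
  | [] => acc
  | w :: ws =>
    match PySem.List.remove? cur w with
    | some m => rneLoopA ws m acc
    | none => rneLoopA ws cur (acc ++ [w])

def remove_non_exist (words : List String) (main_list : List String) : List String :=
  rneLoopA words main_list []

-- ===== PORT B =====
-- the 'for w in words' loop over the count table (drops/rebuild only touch main_list, not the return value)
def rneLoopB (words : List String) (cnt : PySem.Dict String Int) (acc : List String) : List String :=
  match words with
  | [] => acc
  | w :: ws =>
    if cnt.getD w 0 > 0 then rneLoopB ws (cnt.insert w (cnt.getD w 0 - 1)) acc
    else rneLoopB ws cnt (acc ++ [w])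

def remove_non_exist_alt (words : List String) (main_list : List String) : List String :=
  rneLoopB words (main_list.foldl (fun d x => d.insert x (d.getD x 0 + 1)) PySem.Dict.empty) []

-- ===== PRECONDITION & SPEC =====
def Spec_remove_non_exist (words : List String) (main_list : List String) (out : List String) : Prop := out = remove_non_exist_alt words main_list
instance (words : List String) (main_list : List String) (out : List String) : Decidable (Spec_remove_non_exist words main_list out) := by unfold Spec_remove_non_exist; infer_instance

-- ===== CLAIM (what is proved, stated in full; the proofs are below) =====
def Claim_equal_remove_non_exist : Prop := ∀ (words : List String) (main_list : List String), Dom_remove_non_exist words main_list → Spec_remove_non_exist words main_list (remove_non_exist words main_list)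

-- ===== LEMMAS AND PROOFS =====

-- loop invariant: the count table agrees with the multiset of the remaining list
lemma rneLoop_eq (words : List String) : ∀ (cur : List String) (cnt : PySem.Dict String Int)
    (acc : List String), (∀ v, cnt.getD v 0 = (cur.count v : Int)) →
    rneLoopA words cur acc = rneLoopB words cnt acc := by
  induction words with
  | nil => intro cur cnt acc _; rfl
  | cons w ws ih =>
    intro cur cnt acc h
    simp only [rneLoopA, rneLoopB]
    by_cases hm : w ∈ cur
    · rw [PySem.List.remove?_eq_some_erase cur w hm]
      have hc : 0 < cur.count w := List.count_pos_iff.mpr hm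
      have hpos : cnt.getD w 0 > 0 := by rw [h w]; exact_mod_cast hc
      rw [if_pos hpos]
      apply ih
      intro v
      rw [PySem.Dict.getD_insert]
      by_cases hv : v = w
      · subst hv
        rw [if_pos rfl, h v, List.count_erase_self]
        omega
      · rw [if_neg hv, h v, List.count_erase_of_ne hv]
    · rw [(PySem.List.remove?_eq_none_iff cur w).mpr hm]
      have hz : cnt.getD w 0 = 0 := by
        rw [h w, List.count_eq_zero_of_not_mem hm]; rfl
      rw [if_neg (by omega)]
      exact ih cur cnt (acc ++ [w]) h

-- ===== VERDICT (by name: the statement is the Claim_ definition above) =====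
theorem remove_non_exist_spec : Claim_equal_remove_non_exist := by
  intro words main_list _
  unfold Spec_remove_non_exist remove_non_exist remove_non_exist_alt
  rw [PySem.Dict.foldl_insert_getD_add_one_eq_counter]
  exact rneLoop_eq words main_list _ [] (fun v => PySem.Dict.getD_counter main_list v)
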